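-- pv_equiv track=rewrite | github.com/gusdn3477/Algorithm_Study | 프로그래머스/모의고사.py | solution
-- ===== SOURCE A (Python) =====
-- def solution(answers):
--     answer = []
--
--     first = [1, 2, 3, 4, 5]
--     second = [2, 1, 2, 3, 2, 4, 2, 5]
--     third = [3, 3, 1, 1, 2, 2, 4, 4, 5, 5]
--
--     dic = {1: 0, 2: 0, 3: 0}
--
--     for i in range(len(answers)):
--
--         if first[i % len(first)] == answers[i]:
--             dic[1] += 1
--
--         if second[i % len(second)] == answers[i]:
--             dic[2] += 1
--
--         if third[i % len(third)] == answers[i]: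
--             dic[3] += 1
--
--     m = max(dic[1], dic[2], dic[3])
--
--     for i in range(1, 4):
--         if m == dic[i]:
--             answer.append(i)
--
--     return answer
-- ===== SOURCE B (Python) =====
-- def solution(answers):
--     # The three patterns repeat with periods 5, 8, 10, all dividing 40, so the
--     # triple (pattern guesses at position i) depends only on i % 40.  Build one
--     # pattern-independent histogram cnt[(i % 40, answer)] in a single pass, then
--     # read each pattern's score off the 40-entry table with dict lookups.
--     cnt = {}
--     for i, a in enumerate(answers):
--         key = (i % 40, a)
--         cnt[key] = cnt.get(key, 0) + 1
--     patterns = [[1, 2, 3, 4, 5],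
--                 [2, 1, 2, 3, 2, 4, 2, 5],
--                 [3, 3, 1, 1, 2, 2, 4, 4, 5, 5]]
--     scores = [sum(cnt.get((r, p[r % len(p)]), 0) for r in range(40)) for p in patterns]
--     best = max(scores)
--     return [j + 1 for j, s in enumerate(scores) if s == best]
-- ===== Notes on version B (the rewrite author's own statement) =====
-- stated objective: alternative
-- what changed: A interleaves one loop over indices updating a counter per pattern; B instead builds a pattern-independent histogram keyed by (index mod 40, answer) (40 = lcm of the pattern periods) in one pass and then reads each pattern's score off that 40-entry table, so the scoring pass never consults the patterns.
import Mathlib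
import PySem

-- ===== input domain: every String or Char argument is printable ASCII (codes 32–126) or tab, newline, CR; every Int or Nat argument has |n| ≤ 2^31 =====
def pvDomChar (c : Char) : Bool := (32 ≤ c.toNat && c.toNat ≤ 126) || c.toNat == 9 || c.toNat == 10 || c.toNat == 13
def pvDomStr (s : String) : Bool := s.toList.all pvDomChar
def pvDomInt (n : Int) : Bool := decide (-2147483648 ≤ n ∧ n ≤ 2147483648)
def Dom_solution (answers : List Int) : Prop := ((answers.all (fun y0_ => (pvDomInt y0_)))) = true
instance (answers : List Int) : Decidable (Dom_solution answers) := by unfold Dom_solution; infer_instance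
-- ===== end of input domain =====

-- B replaces A's interleaved per-pattern counting loop by a pattern-independent
-- histogram keyed by (index mod 40, answer) — 40 = lcm of the pattern periods —
-- read back with 40 table lookups per pattern (objective: alternative).

-- ===== PORT A =====
-- one interleaved loop over indices, updating a dict {1,2,3} of counters;
-- all list indices A uses are in range and all dict keys are present, so pyGet?
-- results are compared as Options and dict reads use getD / modify with default 0
def solution (answers : List Int) : List Int :=
  let first : List Int := [1, 2, 3, 4, 5]
  let second : List Int := [2, 1, 2, 3, 2, 4, 2, 5]
  let third : List Int := [3, 3, 1, 1, 2, 2, 4, 4, 5, 5]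
  let dic : PySem.Dict Int Int :=
    (((PySem.Dict.empty : PySem.Dict Int Int).insert 1 0).insert 2 0).insert 3 0
  let dic := (PySem.List.pyRange 0 (answers.length : Int) 1).foldl
    (fun d i =>
      let d := if PySem.List.pyGet? first (PySem.Int.mod i (first.length : Int))
                  = PySem.List.pyGet? answers i then d.modify 1 0 (· + 1) else d
      let d := if PySem.List.pyGet? second (PySem.Int.mod i (second.length : Int))
                  = PySem.List.pyGet? answers i then d.modify 2 0 (· + 1) else d
      let d := if PySem.List.pyGet? third (PySem.Int.mod i (third.length : Int))
                  = PySem.List.pyGet? answers i then d.modify 3 0 (· + 1) else d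
      d) dic
  let m := max (dic.getD 1 0) (max (dic.getD 2 0) (dic.getD 3 0))
  (PySem.List.pyRange 1 4 1).foldl
    (fun acc i => if m = dic.getD i 0 then acc ++ [i] else acc) ([] : List Int)

-- ===== PORT B =====
-- one pass: cnt[(i % 40, a)] += 1 (dict.get default 0), then per pattern
-- scores from 40 table lookups; p[r % len(p)] is always in range, so the
-- IndexError-free read is ported as pyGetD
def solution_alt (answers : List Int) : List Int :=
  let cnt : PySem.Dict (Int × Int) Int :=
    (PySem.List.enumerate answers).foldl
      (fun d ia => d.modify (PySem.Int.mod ia.1 40, ia.2) 0 (· + 1))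
      (PySem.Dict.empty : PySem.Dict (Int × Int) Int)
  let patterns : List (List Int) :=
    [[1, 2, 3, 4, 5], [2, 1, 2, 3, 2, 4, 2, 5], [3, 3, 1, 1, 2, 2, 4, 4, 5, 5]]
  let scores : List Int := patterns.map (fun p =>
    ((PySem.List.pyRange 0 40 1).map (fun r =>
        cnt.getD (r, PySem.List.pyGetD p (PySem.Int.mod r (p.length : Int)) 0) 0)).sum)
  let best := (PySem.List.max? scores id).getD 0   -- scores has three elements, so max? is never none
  ((PySem.List.enumerate scores).filter (fun js => js.2 == best)).map (fun js => js.1 + 1)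

-- ===== PRECONDITION & SPEC =====
def Spec_solution (answers : List Int) (out : List Int) : Prop := out = solution_alt answers
instance (answers : List Int) (out : List Int) : Decidable (Spec_solution answers out) := by unfold Spec_solution; infer_instance

-- ===== CLAIM (what is proved, stated in full; the proofs are below) =====
def Claim_equal_solution : Prop := ∀ (answers : List Int), Dom_solution answers → Spec_solution answers (solution answers)

-- ===== LEMMAS AND PROOFS =====

-- A's loop body, named for the proofs (definitionally the lambda inside `solution`)
def pvStep (answers : List Int) (d : PySem.Dict Int Int) (i : Int) : PySem.Dict Int Int :=
  let first : List Int := [1, 2, 3, 4, 5]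
  let second : List Int := [2, 1, 2, 3, 2, 4, 2, 5]
  let third : List Int := [3, 3, 1, 1, 2, 2, 4, 4, 5, 5]
  let d := if PySem.List.pyGet? first (PySem.Int.mod i (first.length : Int))
              = PySem.List.pyGet? answers i then d.modify 1 0 (· + 1) else d
  let d := if PySem.List.pyGet? second (PySem.Int.mod i (second.length : Int))
              = PySem.List.pyGet? answers i then d.modify 2 0 (· + 1) else d
  let d := if PySem.List.pyGet? third (PySem.Int.mod i (third.length : Int))
              = PySem.List.pyGet? answers i then d.modify 3 0 (· + 1) else d
  d

-- A's dict, which always has exactly the keys 1, 2, 3 in this order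
def pvDict3 (a b c : Int) : PySem.Dict Int Int :=
  (((PySem.Dict.empty : PySem.Dict Int Int).insert 1 a).insert 2 b).insert 3 c

-- the canonical per-pattern score both ports are reduced to
def pvScore (p : List Int) (answers : List Int) : Int :=
  ((PySem.List.enumerate answers).map (fun ia =>
    if PySem.List.pyGet? p (PySem.Int.mod ia.1 (p.length : Int)) = some ia.2
    then (1 : Int) else 0)).sum

theorem pvGet_append_left (xs : List Int) (a : Int) (i : Int)
    (h0 : 0 ≤ i) (h1 : i < (xs.length : Int)) :
    PySem.List.pyGet? (xs ++ [a]) i = PySem.List.pyGet? xs i := by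
  unfold PySem.List.pyGet? PySem.List.pyIdx?
  split_ifs with h2
  · simp only [Option.bind_some]
    rw [List.getElem?_append_left (by omega)]
  · exfalso; simp only [List.length_append, List.length_cons, List.length_nil] at h2; omega

theorem pvGet_append_last (xs : List Int) (a : Int) :
    PySem.List.pyGet? (xs ++ [a]) (xs.length : Int) = some a := by
  simp [PySem.List.pyGet?, PySem.List.pyIdx?]

theorem pvScore_append (p : List Int) (xs : List Int) (a : Int) :
    pvScore p (xs ++ [a]) = pvScore p xs +
      (if PySem.List.pyGet? p (PySem.Int.mod (xs.length : Int) (p.length : Int)) = some a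
       then 1 else 0) := by
  simp [pvScore, PySem.List.enumerate_append, PySem.List.enumerate_cons]

theorem pvModify1 (a b c : Int) : (pvDict3 a b c).modify 1 0 (· + 1) = pvDict3 (a+1) b c := by
  simp [pvDict3, PySem.Dict.modify, PySem.Dict.insert, PySem.Dict.getD, PySem.Dict.empty, PySem.Dict.get?]
theorem pvModify2 (a b c : Int) : (pvDict3 a b c).modify 2 0 (· + 1) = pvDict3 a (b+1) c := by
  simp [pvDict3, PySem.Dict.modify, PySem.Dict.insert, PySem.Dict.getD, PySem.Dict.empty, PySem.Dict.get?]
theorem pvModify3 (a b c : Int) : (pvDict3 a b c).modify 3 0 (· + 1) = pvDict3 a b (c+1) := by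
  simp [pvDict3, PySem.Dict.modify, PySem.Dict.insert, PySem.Dict.getD, PySem.Dict.empty, PySem.Dict.get?]

theorem pvGetD3 (a b c : Int) :
    (pvDict3 a b c).getD 1 0 = a ∧ (pvDict3 a b c).getD 2 0 = b ∧ (pvDict3 a b c).getD 3 0 = c := by
  simp [pvDict3, PySem.Dict.insert, PySem.Dict.getD, PySem.Dict.empty, PySem.Dict.get?]

-- invariant of A's loop: the dict holds the three per-pattern scores
theorem pvLoopA (xs : List Int) :
    (PySem.List.pyRange 0 (xs.length : Int) 1).foldl (pvStep xs) (pvDict3 0 0 0)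
      = pvDict3 (pvScore [1,2,3,4,5] xs) (pvScore [2,1,2,3,2,4,2,5] xs)
          (pvScore [3,3,1,1,2,2,4,4,5,5] xs) := by
  induction xs using List.reverseRecOn with
  | nil => decide
  | append_singleton xs a ih =>
      have hlen : (((xs ++ [a]).length : Nat) : Int) = (xs.length : Int) + 1 := by
        simp
      have hinner : List.foldl (pvStep (xs ++ [a])) (pvDict3 0 0 0)
          (PySem.List.pyRange 0 (xs.length : Int) 1)
          = pvDict3 (pvScore [1,2,3,4,5] xs) (pvScore [2,1,2,3,2,4,2,5] xs)
              (pvScore [3,3,1,1,2,2,4,4,5,5] xs) := by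
        rw [PySem.List.foldl_congr_mem _ (pvStep (xs ++ [a])) (pvStep xs) _ ?hcong]
        · exact ih
        case hcong =>
          intro acc i hi
          rw [PySem.List.mem_pyRange_one] at hi
          simp only [pvStep, pvGet_append_left xs a i hi.1 hi.2]
      rw [hlen, PySem.List.pyRange_one_succ_right (by positivity), List.foldl_append, hinner]
      rw [pvScore_append, pvScore_append, pvScore_append]
      simp only [List.foldl, pvStep, pvGet_append_last]
      split_ifs <;> simp only [pvModify1, pvModify2, pvModify3, add_zero]

-- === B side: the histogram characterised ===

-- B's histogram key for one enumerate pair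
def pvKey (ia : Int × Int) : Int × Int := (PySem.Int.mod ia.1 40, ia.2)

-- the multiset of keys B's pass feeds into the dict
def pvL (xs : List Int) : List (Int × Int) := (PySem.List.enumerate xs).map pvKey

-- B's per-pattern score, with the dict lookups replaced by counts over pvL
def pvSH (p : List Int) (xs : List Int) : Int :=
  ((PySem.List.pyRange 0 40 1).map (fun r =>
    (((pvL xs).count (r, PySem.List.pyGetD p (PySem.Int.mod r (p.length : Int)) 0) : Nat) : Int))).sum

-- the dict B builds answers exactly pvL-counts
theorem pvCnt (xs : List Int) (v : Int × Int) :
    ((PySem.List.enumerate xs).foldl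
      (fun d ia => d.modify (PySem.Int.mod ia.1 40, ia.2) 0 (· + 1))
      (PySem.Dict.empty : PySem.Dict (Int × Int) Int)).getD v 0
    = (((pvL xs).count v : Nat) : Int) := by
  have h : (PySem.List.enumerate xs).foldl
      (fun d ia => d.modify (PySem.Int.mod ia.1 40, ia.2) 0 (· + 1))
      (PySem.Dict.empty : PySem.Dict (Int × Int) Int)
      = (pvL xs).foldl (fun d k => d.modify k 0 (· + 1))
          (PySem.Dict.empty : PySem.Dict (Int × Int) Int) := by
    rw [pvL, List.foldl_map]; rfl
  rw [h, PySem.Dict.getD_foldl_modify_add_one]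
  simp [PySem.Dict.getD, PySem.Dict.get?, PySem.Dict.empty]

-- a sum over a nodup list in which at most one term is nonzero
theorem pvSumSingle (l : List Int) (f : Int → Int) (m : Int)
    (hnd : l.Nodup) (hm : m ∈ l) (h0 : ∀ r ∈ l, r ≠ m → f r = 0) :
    (l.map f).sum = f m := by
  induction l with
  | nil => cases hm
  | cons x l ih =>
      obtain ⟨hx, hnd'⟩ := List.nodup_cons.mp hnd
      rcases List.mem_cons.mp hm with h | h
      · subst h
        have hz : (l.map f).sum = 0 := by
          apply List.sum_eq_zero
          intro y hy
          obtain ⟨r, hr, rfl⟩ := List.mem_map.mp hy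
          exact h0 r (List.mem_cons_of_mem _ hr) (fun e => hx (e ▸ hr))
        simp [hz]
      · have hfx : f x = 0 := h0 x (List.mem_cons_self) (fun e => hx (e ▸ h))
        simp [hfx, ih hnd' h (fun r hr hne => h0 r (List.mem_cons_of_mem _ hr) hne)]

theorem pvSH_append (p : List Int) (hpos : 0 < p.length) (hdvd : p.length ∣ 40)
    (xs : List Int) (a : Int) :
    pvSH p (xs ++ [a]) = pvSH p xs +
      (if PySem.List.pyGet? p (PySem.Int.mod (xs.length : Int) (p.length : Int)) = some a
       then 1 else 0) := by
  have hL : pvL (xs ++ [a]) = pvL xs ++ [(((xs.length % 40 : Nat) : Int), a)] := by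
    simp [pvL, PySem.List.enumerate_append, PySem.List.enumerate_cons,
      PySem.List.enumerate_nil, pvKey]
  have hmem : (((xs.length % 40 : Nat) : Int)) ∈ PySem.List.pyRange 0 40 1 := by
    rw [PySem.List.mem_pyRange_one]
    have := Nat.mod_lt xs.length (show 0 < 40 by norm_num)
    omega
  have hkey : PySem.List.pyGetD p (PySem.Int.mod ((xs.length % 40 : Nat) : Int) (p.length : Int)) 0
      = p[xs.length % p.length]'(Nat.mod_lt _ hpos) := by
    rw [PySem.Int.mod_natCast, Nat.mod_mod_of_dvd _ hdvd,
      PySem.List.pyGetD_natCast, List.getD_eq_getElem?_getD,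
      List.getElem?_eq_getElem (Nat.mod_lt _ hpos), Option.getD_some]
  have hget : PySem.List.pyGet? p (PySem.Int.mod (xs.length : Int) (p.length : Int))
      = some (p[xs.length % p.length]'(Nat.mod_lt _ hpos)) := by
    rw [PySem.Int.mod_natCast, PySem.List.pyGet?_natCast,
      List.getElem?_eq_getElem (Nat.mod_lt _ hpos)]
  unfold pvSH
  rw [hL]
  have hsplit : ∀ r : Int,
      ((((pvL xs ++ [(((xs.length % 40 : Nat) : Int), a)]).count
          (r, PySem.List.pyGetD p (PySem.Int.mod r (p.length : Int)) 0) : Nat) : Int))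
      = (((pvL xs).count (r, PySem.List.pyGetD p (PySem.Int.mod r (p.length : Int)) 0) : Nat) : Int)
        + (if ((((xs.length % 40 : Nat) : Int), a)
              = (r, PySem.List.pyGetD p (PySem.Int.mod r (p.length : Int)) 0)) then 1 else 0) := by
    intro r
    rw [List.count_append]
    push_cast
    congr 1
    simp [List.count_cons, beq_iff_eq]
  calc ((PySem.List.pyRange 0 40 1).map (fun r =>
          (((pvL xs ++ [(((xs.length % 40 : Nat) : Int), a)]).count
            (r, PySem.List.pyGetD p (PySem.Int.mod r (p.length : Int)) 0) : Nat) : Int))).sum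
      = ((PySem.List.pyRange 0 40 1).map (fun r =>
          (((pvL xs).count (r, PySem.List.pyGetD p (PySem.Int.mod r (p.length : Int)) 0) : Nat) : Int)
          + (if ((((xs.length % 40 : Nat) : Int), a)
                = (r, PySem.List.pyGetD p (PySem.Int.mod r (p.length : Int)) 0)) then 1 else 0))).sum := by
        rw [List.map_congr_left (fun r _ => hsplit r)]
    _ = ((PySem.List.pyRange 0 40 1).map (fun r =>
          (((pvL xs).count (r, PySem.List.pyGetD p (PySem.Int.mod r (p.length : Int)) 0) : Nat) : Int))).sum
        + ((PySem.List.pyRange 0 40 1).map (fun r =>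
            (if ((((xs.length % 40 : Nat) : Int), a)
                = (r, PySem.List.pyGetD p (PySem.Int.mod r (p.length : Int)) 0)) then 1 else 0))).sum := by
        rw [PySem.List.sum_map_add_int]
    _ = pvSH p xs + (if PySem.List.pyGet? p (PySem.Int.mod (xs.length : Int) (p.length : Int)) = some a
          then 1 else 0) := by
        unfold pvSH
        congr 1
        rw [pvSumSingle _ _ (((xs.length % 40 : Nat) : Int)) (PySem.List.nodup_pyRange_one 0 40) hmem]
        · rw [hkey, hget]
          by_cases hcond : p[xs.length % p.length]'(Nat.mod_lt _ hpos) = a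
          · simp [hcond]
          · simp [hcond, Ne.symm hcond, Prod.ext_iff]
        · intro r hr hne
          rw [if_neg]
          intro hpair
          exact hne (Prod.ext_iff.mp hpair).1.symm

theorem pvSH_eq (p : List Int) (hpos : 0 < p.length) (hdvd : p.length ∣ 40) (xs : List Int) :
    pvSH p xs = pvScore p xs := by
  induction xs using List.reverseRecOn with
  | nil =>
      have h : pvSH p [] = 0 := by
        simp [pvSH, pvL, PySem.List.enumerate_nil]
      rw [h]; simp [pvScore, PySem.List.enumerate_nil]
  | append_singleton xs a ih =>
      rw [pvSH_append p hpos hdvd, pvScore_append, ih]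

-- folding B's score expression back to pvSH (definitional)
theorem pvSH_def (q : List Int) (xs : List Int) :
    ((PySem.List.pyRange 0 40 1).map (fun r =>
      (((pvL xs).count (r, PySem.List.pyGetD q (PySem.Int.mod r (q.length : Int)) 0) : Nat) : Int))).sum
    = pvSH q xs := rfl

-- B, rewritten over the three canonical scores
theorem pvAltChar (xs : List Int) :
    solution_alt xs =
      ((PySem.List.enumerate [pvScore [1,2,3,4,5] xs, pvScore [2,1,2,3,2,4,2,5] xs,
          pvScore [3,3,1,1,2,2,4,4,5,5] xs]).filter
        (fun js => js.2 == ((PySem.List.max? [pvScore [1,2,3,4,5] xs,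
          pvScore [2,1,2,3,2,4,2,5] xs, pvScore [3,3,1,1,2,2,4,4,5,5] xs] id).getD 0))).map
        (fun js => js.1 + 1) := by
  unfold solution_alt
  simp only [List.map_cons, List.map_nil, pvCnt]
  simp only [pvSH_def]
  rw [pvSH_eq [1,2,3,4,5] (by norm_num) (by norm_num),
    pvSH_eq [2,1,2,3,2,4,2,5] (by norm_num) (by norm_num),
    pvSH_eq [3,3,1,1,2,2,4,4,5,5] (by norm_num) (by norm_num)]

-- Python's max(scores) on the three-element list is max s1 (max s2 s3)
theorem pvBest (s1 s2 s3 : Int) : ((PySem.List.max? [s1,s2,s3] id).getD 0) = max s1 (max s2 s3) := by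
  simp only [PySem.List.max?, List.foldl, id]
  rcases Int.lt_or_le s1 s2 with h1 | h1 <;> rcases Int.lt_or_le s2 s3 with h2 | h2 <;>
    rcases Int.lt_or_le s1 s3 with h3 | h3 <;> simp [h1, h2, h3, not_lt.mpr] <;> omega

-- the two post-loop phases agree, as functions of the three scores
theorem pvFinal (s1 s2 s3 : Int) :
    (PySem.List.pyRange 1 4 1).foldl
      (fun acc i => if (max ((pvDict3 s1 s2 s3).getD 1 0) (max ((pvDict3 s1 s2 s3).getD 2 0) ((pvDict3 s1 s2 s3).getD 3 0))) = (pvDict3 s1 s2 s3).getD i 0 then acc ++ [i] else acc) ([] : List Int)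
    = ((PySem.List.enumerate [s1, s2, s3]).filter
        (fun js => js.2 == ((PySem.List.max? [s1,s2,s3] id).getD 0))).map (fun js => js.1 + 1) := by
  have hr : PySem.List.pyRange 1 4 1 = [1, 2, 3] := by decide
  rw [hr, pvBest]
  obtain ⟨g1, g2, g3⟩ := pvGetD3 s1 s2 s3
  simp only [List.foldl, g1, g2, g3, PySem.List.enumerate_cons, PySem.List.enumerate_nil,
    List.filter_cons, List.filter_nil, beq_iff_eq]
  generalize max s1 (max s2 s3) = m
  split_ifs <;> first | rfl | (exfalso; omega)

-- ===== VERDICT (by name: the statement is the Claim_ definition above) =====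
theorem solution_spec : Claim_equal_solution := by
  intro answers _
  unfold Spec_solution
  have h := pvLoopA answers
  calc solution answers
      = (PySem.List.pyRange 1 4 1).foldl
          (fun acc i =>
            if (max (((PySem.List.pyRange 0 (answers.length : Int) 1).foldl (pvStep answers) (pvDict3 0 0 0)).getD 1 0)
                  (max (((PySem.List.pyRange 0 (answers.length : Int) 1).foldl (pvStep answers) (pvDict3 0 0 0)).getD 2 0)
                       (((PySem.List.pyRange 0 (answers.length : Int) 1).foldl (pvStep answers) (pvDict3 0 0 0)).getD 3 0)))
                = ((PySem.List.pyRange 0 (answers.length : Int) 1).foldl (pvStep answers) (pvDict3 0 0 0)).getD i 0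
            then acc ++ [i] else acc) ([] : List Int) := rfl
    _ = solution_alt answers := by rw [h, pvFinal, ← pvAltChar]
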